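-- pv_equiv track=rewrite | github.com/IINemo/bert_sequence_tagger | src/bert_sequence_tagger/sequence_tagger_bert.py | _add_x_labels
-- ===== SOURCE A (Python) =====
-- def _add_x_labels(labels, bpe_masks):
--     result_labels = []
--     for l_sent, m_sent in zip(labels, bpe_masks):
--         m_sent = m_sent[1:-1]
--         sent_res = []
--         i = 0
--         for l in l_sent:
--             sent_res.append(l)
--
--             i += 1
--             while i < len(m_sent) and (m_sent[i] == 0):
--                 i += 1
--                 sent_res.append('[PAD]')
--
--         result_labels.append(sent_res)
--
--     return result_labels
-- ===== SOURCE B (Python) =====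
-- def _add_x_labels(labels, bpe_masks):
--     result_labels = []
--     for l_sent, m_sent in zip(labels, bpe_masks):
--         m_sent = m_sent[1:-1]
--         # run-lengths of zeros (continuation BPEs) between word starts; the first
--         # kept mask position always carries the first label, so gaps start after it
--         gaps = []
--         run = 0
--         for m in m_sent[1:]:
--             if m == 0:
--                 run += 1
--             else:
--                 gaps.append(run)
--                 run = 0
--         gaps.append(run)
--         gi = iter(gaps)
--         sent_res = []
--         for l in l_sent:
--             sent_res.append(l)
--             sent_res.extend(['[PAD]'] * next(gi, 0))
--         result_labels.append(sent_res)
--     return result_labels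
-- ===== Notes on version B (the rewrite author's own statement) =====
-- stated objective: alternative
-- what changed: Instead of A's label-driven loop with a nested zero-skipping while over a mask index, B first compresses the trimmed mask into a list of zero-run lengths (gaps between word starts) in one pass, then emits each label followed by that many '[PAD]'s, taking 0 when the gaps run out.
import Mathlib
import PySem

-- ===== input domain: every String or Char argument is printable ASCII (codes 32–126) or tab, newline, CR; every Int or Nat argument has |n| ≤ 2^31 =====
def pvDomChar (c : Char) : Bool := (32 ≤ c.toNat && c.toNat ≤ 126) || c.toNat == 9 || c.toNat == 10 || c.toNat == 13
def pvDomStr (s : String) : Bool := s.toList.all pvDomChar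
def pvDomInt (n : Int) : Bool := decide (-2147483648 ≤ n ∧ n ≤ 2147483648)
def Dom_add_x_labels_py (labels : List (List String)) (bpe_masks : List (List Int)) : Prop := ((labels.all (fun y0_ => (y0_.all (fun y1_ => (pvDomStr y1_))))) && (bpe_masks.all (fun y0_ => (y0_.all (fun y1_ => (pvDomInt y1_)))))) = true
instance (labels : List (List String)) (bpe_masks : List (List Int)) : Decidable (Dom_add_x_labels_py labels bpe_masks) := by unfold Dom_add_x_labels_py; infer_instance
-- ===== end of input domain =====

-- B precomputes the zero-run gap lengths of the trimmed mask once and then emits each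
-- label followed by that many pads, replacing A's index-managed nested while (objective: alternative).

-- ===== PORT A =====
-- the inner `while i < len(m_sent) and m_sent[i] == 0: i += 1; sent_res.append('[PAD]')`
def aWhile (m : List Int) (acc : List String) (i : Nat) : List String × Nat :=
  if h : i < m.length ∧ m[i]! = 0 then aWhile m (acc ++ ["[PAD]"]) (i + 1) else (acc, i)
termination_by m.length - i
decreasing_by omega

-- the `for l in l_sent` loop, state (sent_res, i)
def aLoop (m : List Int) : List String → List String × Nat → List String
  | [], st => st.1
  | lab :: rest, st => aLoop m rest (aWhile m (st.1 ++ [lab]) (st.2 + 1))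

def add_x_labels_py (labels : List (List String)) (bpe_masks : List (List Int)) : List (List String) :=
  (labels.zip bpe_masks).map (fun p => aLoop (PySem.List.slice p.2 (some 1) (some (-1))) p.1 ([], 0))

-- ===== PORT B =====
-- `for m in m_sent[1:]: …` building the zero-run lengths, with `run` as accumulator
def bGaps : List Int → Nat → List Nat
  | [], run => [run]
  | x :: rest, run => if x = 0 then bGaps rest (run + 1) else run :: bGaps rest 0

-- `for l in l_sent: append l; extend ['[PAD]'] * next(gi, 0)`; gs is the iterator's suffix
def bEmit : List Nat → List String → List String
  | _, [] => []
  | gs, lab :: ls => lab :: (List.replicate (gs.headD 0) "[PAD]" ++ bEmit gs.tail ls)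

def add_x_labels_py_alt (labels : List (List String)) (bpe_masks : List (List Int)) : List (List String) :=
  (labels.zip bpe_masks).map (fun p =>
    bEmit (bGaps ((PySem.List.slice p.2 (some 1) (some (-1))).tail) 0) p.1)

-- ===== PRECONDITION & SPEC =====
def Spec_add_x_labels_py (labels : List (List String)) (bpe_masks : List (List Int)) (out : List (List String)) : Prop := out = add_x_labels_py_alt labels bpe_masks
instance (labels : List (List String)) (bpe_masks : List (List Int)) (out : List (List String)) : Decidable (Spec_add_x_labels_py labels bpe_masks out) := by unfold Spec_add_x_labels_py; infer_instance

-- ===== CLAIM (what is proved, stated in full; the proofs are below) =====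
def Claim_equal_add_x_labels_py : Prop := ∀ (labels : List (List String)) (bpe_masks : List (List Int)), Dom_add_x_labels_py labels bpe_masks → Spec_add_x_labels_py labels bpe_masks (add_x_labels_py labels bpe_masks)

-- ===== LEMMAS AND PROOFS =====

-- leading-zero count of a mask suffix
def lz : List Int → Nat
  | [] => 0
  | x :: r => if x = 0 then lz r + 1 else 0

lemma lz_le (s : List Int) : lz s ≤ s.length := by
  induction s with
  | nil => simp [lz]
  | cons x r ih => by_cases h : x = 0 <;> simp [lz, h] <;> omega

-- A's inner while appends one pad per leading zero of the remaining mask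
lemma aWhile_eq (m : List Int) : ∀ k i acc, m.length - i ≤ k →
    aWhile m acc i = (acc ++ List.replicate (lz (m.drop i)) "[PAD]", i + lz (m.drop i)) := by
  intro k
  induction k with
  | zero =>
      intro i acc hk
      have hge : m.length ≤ i := by omega
      rw [List.drop_eq_nil_of_le hge, aWhile]
      simp [lz, Nat.not_lt.mpr hge]
  | succ k ih =>
      intro i acc hk
      by_cases hlt : i < m.length
      · have hdrop : m.drop i = m[i] :: m.drop (i + 1) := List.drop_eq_getElem_cons hlt
        have hbang : m[i]! = m[i] := getElem!_pos m i hlt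
        by_cases hz : m[i] = 0
        · rw [aWhile]
          simp only [hlt, hbang, hz, and_true, if_pos, dif_pos (And.intro hlt (hbang ▸ hz))]
          rw [ih (i + 1) (acc ++ ["[PAD]"]) (by omega), hdrop]
          simp [lz, hz, List.replicate_succ]
          omega
        · rw [aWhile]
          have : ¬ (i < m.length ∧ m[i]! = 0) := by rw [hbang]; tauto
          rw [dif_neg this, hdrop]
          simp [lz, hz]
      · have hge : m.length ≤ i := by omega
        rw [List.drop_eq_nil_of_le hge, aWhile]
        simp [lz, Nat.not_lt.mpr hge]

-- the first gap produced by bGaps is run + leading zeros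
lemma bGaps_head (s : List Int) : ∀ run, (bGaps s run).headD 0 = run + lz s := by
  induction s with
  | nil => intro run; simp [bGaps, lz]
  | cons x r ih =>
      intro run
      by_cases h : x = 0
      · rw [bGaps, if_pos h, ih (run + 1)]
        simp [lz, h]
        omega
      · rw [bGaps, if_neg h]
        simp [lz, h]

-- the remaining gaps after the first
lemma bGaps_tail (s : List Int) : ∀ run,
    (bGaps s run).tail = if lz s < s.length then bGaps (s.drop (lz s + 1)) 0 else [] := by
  induction s with
  | nil => intro run; simp [bGaps, lz]
  | cons x r ih =>
      intro run
      rw [show lz (x :: r) = if x = 0 then lz r + 1 else 0 from rfl]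
      by_cases h : x = 0
      · rw [bGaps, if_pos h, ih (run + 1), if_pos h]
        by_cases hlt : lz r < r.length
        · rw [if_pos hlt, if_pos (by simpa using Nat.add_lt_add_right hlt 1)]
          rfl
        · rw [if_neg hlt, if_neg (by simp; omega)]
      · rw [bGaps, if_neg h, if_neg h]
        simp

-- emission ignores a single trailing zero gap
lemma bEmit_zero (ls : List String) : bEmit [0] ls = bEmit [] ls := by
  cases ls <;> simp [bEmit]

-- main invariant: A's label loop from mask index i equals B's emission over the gaps
-- of the mask suffix past position i
lemma aLoop_eq (m : List Int) : ∀ (l acc : List String) (i : Nat),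
    aLoop m l (acc, i) = acc ++ bEmit (bGaps (m.drop (i + 1)) 0) l := by
  intro l
  induction l with
  | nil => intro acc i; simp [aLoop, bEmit]
  | cons lab ls ih =>
      intro acc i
      set s := m.drop (i + 1) with hs
      have hz := lz_le s
      rw [aLoop, aWhile_eq m (m.length - (i + 1)) (i + 1) (acc ++ [lab]) (le_refl _)]
      rw [ih (acc ++ [lab] ++ List.replicate (lz (m.drop (i + 1))) "[PAD]") (i + 1 + lz (m.drop (i + 1)))]
      have hdrop : m.drop (i + 1 + lz s + 1) = s.drop (lz s + 1) := by
        rw [hs, List.drop_drop]; ring_nf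
      rw [show bEmit (bGaps s 0) (lab :: ls)
            = lab :: (List.replicate (lz s) "[PAD]" ++ bEmit ((bGaps s 0).tail) ls) by
        rw [bEmit, bGaps_head]; rw [Nat.zero_add]]
      rw [bGaps_tail]
      by_cases hlt : lz s < s.length
      · simp [hlt, ← hs, hdrop]
      · have heq : lz s = s.length := by omega
        have : s.drop (lz s + 1) = [] := List.drop_eq_nil_of_le (by omega)
        simp [hlt, ← hs, hdrop, this, bGaps, bEmit_zero]

-- ===== VERDICT (by name: the statement is the Claim_ definition above) =====
theorem add_x_labels_py_spec : Claim_equal_add_x_labels_py := by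
  intro labels bpe_masks _
  unfold Spec_add_x_labels_py add_x_labels_py add_x_labels_py_alt
  refine List.map_congr_left (fun p _ => ?_)
  rw [aLoop_eq _ p.1 [] 0]
  simp [List.drop_one]
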